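-- pv_equiv track=rewrite | github.com/ryanvilbrandt/comic_git | src/scripts/build_site.py | get_storylines
-- ===== SOURCE A (Python) =====
-- from collections import OrderedDict, defaultdict
-- from typing import Dict, List, Tuple
--
-- def get_storylines(comic_data_dicts: List[Dict]) -> OrderedDict:
--     # Start with an OrderedDict, so we can easily drop the pages we encounter in the proper buckets, while keeping
--     # their proper order
--     storylines_dict = OrderedDict()
--     for comic_data in comic_data_dicts:
--         storyline = comic_data["storyline"]
--         if not storyline:
--             storyline = "Uncategorized"
--         if storyline not in storylines_dict.keys():
--             storylines_dict[storyline] = []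
--         storylines_dict[storyline].append(comic_data.copy())
--     if "Uncategorized" in storylines_dict:
--         storylines_dict.move_to_end("Uncategorized")
--     return storylines_dict
-- ===== SOURCE B (Python) =====
-- from collections import OrderedDict
-- from typing import Dict, List
--
--
-- def get_storylines(comic_data_dicts: List[Dict]) -> OrderedDict:
--     # Stable partition: every Uncategorized page goes after all categorized ones,
--     # then one grouping pass needs no final move_to_end.
--     def key(cd):
--         return cd["storyline"] or "Uncategorized"
--
--     ordered = [cd for cd in comic_data_dicts if key(cd) != "Uncategorized"] + \
--               [cd for cd in comic_data_dicts if key(cd) == "Uncategorized"]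
--     storylines_dict = OrderedDict()
--     for cd in ordered:
--         storylines_dict.setdefault(key(cd), []).append(cd.copy())
--     return storylines_dict
-- ===== Notes on version B (the rewrite author's own statement) =====
-- stated objective: alternative
-- what changed: Instead of grouping in input order and calling move_to_end at the end, B first stably partitions the pages so Uncategorized ones come last, then does a single setdefault-based grouping pass with no reordering step.
import Mathlib
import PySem

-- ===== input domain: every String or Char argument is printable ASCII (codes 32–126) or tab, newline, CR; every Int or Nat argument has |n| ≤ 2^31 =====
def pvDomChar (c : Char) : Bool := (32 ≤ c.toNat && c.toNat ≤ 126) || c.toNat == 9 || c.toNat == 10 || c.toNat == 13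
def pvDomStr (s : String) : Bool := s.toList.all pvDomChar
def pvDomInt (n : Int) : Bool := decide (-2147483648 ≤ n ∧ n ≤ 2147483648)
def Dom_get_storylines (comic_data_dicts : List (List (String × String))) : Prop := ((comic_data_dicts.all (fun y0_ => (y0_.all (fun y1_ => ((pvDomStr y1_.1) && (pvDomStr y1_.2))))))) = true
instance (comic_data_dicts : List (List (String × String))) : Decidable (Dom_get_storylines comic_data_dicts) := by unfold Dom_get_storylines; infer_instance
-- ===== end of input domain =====

-- B replaces A's "group in input order, then move_to_end('Uncategorized')" by a stable
-- partition that puts Uncategorized pages last, followed by one setdefault-grouping pass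
-- (alternative decomposition; return value proved equal on Pre_).

-- ===== PORT A =====
def get_storylines (comic_data_dicts : List (List (String × String))) : List (String × List (List (String × String))) :=
  -- storylines_dict = OrderedDict(); for comic_data in comic_data_dicts: ...
  let d := comic_data_dicts.foldl (fun d comic_data =>
      -- storyline = comic_data["storyline"]  (KeyError excluded by Pre_)
      let storyline := (PySem.Dict.get? (PySem.Dict.mk comic_data) "storyline").getD ""
      -- if not storyline: storyline = "Uncategorized"
      let storyline := if storyline == "" then "Uncategorized" else storyline
      -- if storyline not in storylines_dict.keys(): storylines_dict[storyline] = []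
      let d := if d.contains storyline then d else d.insert storyline []
      -- storylines_dict[storyline].append(comic_data.copy())
      d.modify storyline [] (fun l => l ++ [comic_data])
    ) PySem.Dict.empty
  -- if "Uncategorized" in storylines_dict: storylines_dict.move_to_end("Uncategorized")
  if d.contains "Uncategorized" then
    ((d.erase "Uncategorized").insert "Uncategorized" (d.getD "Uncategorized" [])).items
  else d.items

-- ===== PORT B =====
-- key(cd) = cd["storyline"] or "Uncategorized"
def pvKey (cd : List (String × String)) : String :=
  let s := (PySem.Dict.get? (PySem.Dict.mk cd) "storyline").getD ""
  if s == "" then "Uncategorized" else s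

def get_storylines_alt (comic_data_dicts : List (List (String × String))) : List (String × List (List (String × String))) :=
  -- ordered = [cd for cd if key(cd) != "Uncategorized"] + [cd for cd if key(cd) == "Uncategorized"]
  let ordered := comic_data_dicts.filter (fun cd => !(pvKey cd == "Uncategorized"))
                   ++ comic_data_dicts.filter (fun cd => pvKey cd == "Uncategorized")
  -- for cd in ordered: storylines_dict.setdefault(key(cd), []).append(cd.copy())
  (ordered.foldl (fun d cd =>
      let d := d.setdefault (pvKey cd) []
      d.modify (pvKey cd) [] (fun l => l ++ [cd])
    ) PySem.Dict.empty).items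

-- ===== PRECONDITION & SPEC =====
-- Pre_ excludes exactly the inputs where the Python A raises KeyError: a page dict
-- without a "storyline" key (B raises the same KeyError there).
def Pre_get_storylines (comic_data_dicts : List (List (String × String))) : Prop :=
  (comic_data_dicts.all (fun cd => cd.any (fun p => p.1 == "storyline"))) = true
instance (comic_data_dicts : List (List (String × String))) : Decidable (Pre_get_storylines comic_data_dicts) := by unfold Pre_get_storylines; infer_instance

def pvWitness_get_storylines : (List (List (String × String))) :=
  [[("storyline", "Arc 1")], [("storyline", "")], [("storyline", "Arc 1")]]

def Spec_get_storylines (comic_data_dicts : List (List (String × String))) (out : List (String × List (List (String × String)))) : Prop := out = get_storylines_alt comic_data_dicts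
instance (comic_data_dicts : List (List (String × String))) (out : List (String × List (List (String × String)))) : Decidable (Spec_get_storylines comic_data_dicts out) := by unfold Spec_get_storylines; infer_instance

-- ===== CLAIM (what is proved, stated in full; the proofs are below) =====
def Claim_equal_get_storylines : Prop := ∀ (comic_data_dicts : List (List (String × String))), Dom_get_storylines comic_data_dicts → Pre_get_storylines comic_data_dicts → Spec_get_storylines comic_data_dicts (get_storylines comic_data_dicts)

-- ===== LEMMAS AND PROOFS =====

-- the common grouping step both loops reduce to
def pvStep (d : PySem.Dict String (List (List (String × String)))) (cd : List (String × String)) :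
    PySem.Dict String (List (List (String × String))) :=
  d.modify (pvKey cd) [] (fun l => l ++ [cd])

def pvFold (xs : List (List (String × String))) : PySem.Dict String (List (List (String × String))) :=
  xs.foldl pvStep PySem.Dict.empty

lemma pvStepA_eq (d : PySem.Dict String (List (List (String × String)))) (cd : List (String × String)) :
    (if d.contains (pvKey cd) then d else d.insert (pvKey cd) []).modify (pvKey cd) [] (fun l => l ++ [cd])
      = pvStep d cd := by
  unfold pvStep
  by_cases hc : d.contains (pvKey cd) = true
  · simp [hc]
  · simp only [Bool.not_eq_true] at hc
    simp [hc, PySem.Dict.modify, PySem.Dict.getD_insert_self, PySem.Dict.insert_insert_self,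
      PySem.Dict.getD_of_not_contains _ _ hc]

lemma pvStepB_eq (d : PySem.Dict String (List (List (String × String)))) (cd : List (String × String)) :
    (d.setdefault (pvKey cd) []).modify (pvKey cd) [] (fun l => l ++ [cd]) = pvStep d cd := by
  unfold pvStep
  by_cases hc : d.contains (pvKey cd) = true
  · simp [PySem.Dict.setdefault_of_contains _ _ hc]
  · simp only [Bool.not_eq_true] at hc
    simp [PySem.Dict.setdefault_of_not_contains _ _ hc, PySem.Dict.modify,
      PySem.Dict.getD_insert_self, PySem.Dict.insert_insert_self, PySem.Dict.getD_of_not_contains _ _ hc]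

lemma pvKeys_fold (xs : List (List (String × String))) :
    (pvFold xs).keys = PySem.Set.ofList (xs.map pvKey) := by
  have h := PySem.Dict.keys_foldl_modify_key xs pvKey ([] : List (List (String × String)))
      (fun _ cd => fun l => l ++ [cd]) PySem.Dict.empty
  simpa [pvFold, pvStep, PySem.Set.update_nil_left] using h

lemma pvNodup_fold (xs : List (List (String × String))) : (pvFold xs).keys.Nodup := by
  have h := PySem.Dict.nodup_keys_foldl_modify_key xs pvKey ([] : List (List (String × String)))
      (fun _ cd => fun l => l ++ [cd]) PySem.Dict.empty (by simp)
  simpa [pvFold, pvStep] using h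

lemma pvGetD_fold (xs : List (List (String × String))) (c : String) :
    (pvFold xs).getD c [] = xs.filter (fun cd => pvKey cd == c) := by
  have hmap : pvFold xs = (xs.map (fun cd => (pvKey cd, cd))).foldl
      (fun d p => d.modify p.1 [] (fun l => l ++ [p.2])) PySem.Dict.empty := by
    rw [List.foldl_map]
    rfl
  rw [hmap, PySem.Dict.getD_foldl_modify_append]
  rw [List.filter_map]
  simp [Function.comp_def]

lemma pvItems_fold (xs : List (List (String × String))) :
    (pvFold xs).items
      = (PySem.Set.ofList (xs.map pvKey)).map (fun k => (k, xs.filter (fun cd => pvKey cd == k))) := by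
  rw [PySem.Dict.items_eq_map_keys _ (pvNodup_fold xs) [], pvKeys_fold]
  exact List.map_congr_left (fun k _ => by rw [pvGetD_fold])

lemma pvFilter_update {α : Type} [BEq α] [LawfulBEq α] (q : α → Bool) (l : List α) (s : PySem.Set α) :
    (PySem.Set.update s l).filter q = PySem.Set.update (s.filter q) (l.filter q) := by
  induction l generalizing s with
  | nil => simp [PySem.Set.update]
  | cons x t ih =>
    rw [show PySem.Set.update s (x :: t) = PySem.Set.update (PySem.Set.add s x) t from rfl]
    by_cases hx : q x = true
    · have hadd : (PySem.Set.add s x).filter q = PySem.Set.add (s.filter q) x := by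
        by_cases hm : x ∈ s
        · simp [PySem.Set.add, PySem.Set.contains, hm, hx]
        · simp [PySem.Set.add, PySem.Set.contains, hm, hx]
      rw [List.filter_cons_of_pos hx,
        show PySem.Set.update (s.filter q) (x :: t.filter q)
          = PySem.Set.update (PySem.Set.add (s.filter q) x) (t.filter q) from rfl,
        ih, hadd]
    · have hadd : (PySem.Set.add s x).filter q = s.filter q := by
        by_cases hm : x ∈ s
        · simp [PySem.Set.add, PySem.Set.contains, hm]
        · simp [PySem.Set.add, PySem.Set.contains, hm, hx]
      rw [List.filter_cons_of_neg (by simp [hx]), ih, hadd]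

lemma pvOfList_filter {α : Type} [BEq α] [LawfulBEq α] (q : α → Bool) (l : List α) :
    PySem.Set.ofList (l.filter q) = (PySem.Set.ofList l).filter q := by
  simpa [PySem.Set.update_nil_left] using (pvFilter_update q l []).symm

lemma pvFoldl_add_singleton {α : Type} [BEq α] [LawfulBEq α] (u : α) (n : Nat) :
    List.foldl PySem.Set.add [u] (List.replicate n u) = [u] := by
  induction n with
  | zero => rfl
  | succ m ih =>
    rw [List.replicate_succ, List.foldl_cons,
      show PySem.Set.add [u] u = [u] by simp [PySem.Set.add, PySem.Set.contains], ih]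

lemma pvOfList_filter_beq (l : List String) (u : String) (hu : u ∈ l) :
    PySem.Set.ofList (l.filter (fun s => s == u)) = [u] := by
  rw [List.filter_beq u]
  obtain ⟨m, hm⟩ : ∃ m, l.count u = m + 1 :=
    ⟨l.count u - 1, by have := List.count_pos_iff.mpr hu; omega⟩
  rw [hm, List.replicate_succ]
  show List.foldl PySem.Set.add (PySem.Set.add [] u) (List.replicate m u) = [u]
  rw [show PySem.Set.add ([] : PySem.Set String) u = [u] from rfl, pvFoldl_add_singleton]

lemma pvKeys_split (l : List String) (u : String) (hu : u ∈ l) :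
    PySem.Set.ofList (l.filter (fun s => !(s == u)) ++ l.filter (fun s => s == u))
      = (PySem.Set.ofList l).filter (fun s => !(s == u)) ++ [u] := by
  rw [PySem.Set.ofList_append, PySem.Set.update_eq_append_filter,
    pvOfList_filter_beq l u hu, pvOfList_filter]
  congr 1
  simp [PySem.Set.contains]

lemma pvFoldA_eq (xs : List (List (String × String))) :
    xs.foldl (fun d comic_data =>
      let storyline := (PySem.Dict.get? (PySem.Dict.mk comic_data) "storyline").getD ""
      let storyline := if storyline == "" then "Uncategorized" else storyline
      let d := if d.contains storyline then d else d.insert storyline []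
      d.modify storyline [] (fun l => l ++ [comic_data])) PySem.Dict.empty = pvFold xs := by
  unfold pvFold
  congr 1
  funext d cd
  exact pvStepA_eq d cd

lemma pvFoldB_eq (xs : List (List (String × String))) :
    xs.foldl (fun d cd =>
      let d := d.setdefault (pvKey cd) []
      d.modify (pvKey cd) [] (fun l => l ++ [cd])) PySem.Dict.empty = pvFold xs := by
  unfold pvFold
  congr 1
  funext d cd
  exact pvStepB_eq d cd

theorem pvMain (xs : List (List (String × String))) :
    get_storylines xs = get_storylines_alt xs := by
  unfold get_storylines get_storylines_alt
  simp only [pvFoldA_eq, pvFoldB_eq]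
  by_cases hu : "Uncategorized" ∈ xs.map pvKey
  · -- Uncategorized occurs: A moves it to the end, B already placed it last
    have hcon : (pvFold xs).contains "Uncategorized" = true := by
      rw [PySem.Dict.contains_iff_mem_keys, pvKeys_fold, PySem.Set.mem_ofList]
      exact hu
    rw [if_pos hcon]
    -- the erased dict does not contain "Uncategorized"
    have hnc : ((pvFold xs).erase "Uncategorized").contains "Uncategorized" = false := by
      simp [PySem.Dict.erase, PySem.Dict.contains, List.any_filter]
    rw [PySem.Dict.items_insert_of_not_contains _ _ hnc]
    have herase : ((pvFold xs).erase "Uncategorized").items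
        = (pvFold xs).items.filter (fun p => !(p.1 == "Uncategorized")) := rfl
    rw [herase, pvGetD_fold, pvItems_fold, List.filter_map]
    -- B side
    have hqmap : (xs.filter (fun cd => pvKey cd == "Uncategorized")).map pvKey
        = (xs.map pvKey).filter (fun s => s == "Uncategorized") := by
      rw [List.filter_map]; rfl
    have hpmap : (xs.filter (fun cd => !(pvKey cd == "Uncategorized"))).map pvKey
        = (xs.map pvKey).filter (fun s => !(s == "Uncategorized")) := by
      rw [List.filter_map]; rfl
    rw [pvItems_fold, List.map_append, hpmap, hqmap, pvKeys_split _ _ hu, List.map_append]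
    congr 1
    · -- non-Uncategorized buckets agree
      apply List.map_congr_left
      intro k hk
      have hkne : k ≠ "Uncategorized" := by
        have := (List.mem_filter.mp hk).2
        simpa using this
      congr 1
      rw [List.filter_append, List.filter_filter, List.filter_filter]
      have h2 : xs.filter (fun a => pvKey a == k && pvKey a == "Uncategorized") = [] := by
        apply List.filter_eq_nil_iff.mpr
        intro cd _
        simp only [Bool.and_eq_true, beq_iff_eq, not_and]
        intro h1 h2
        exact hkne (by rw [← h1, h2])
      rw [h2, List.append_nil]
      apply List.filter_congr
      intro cd _
      by_cases hck : pvKey cd = k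
      · simp [hck, hkne]
      · simp [hck]
    · -- the Uncategorized bucket
      simp only [List.map_cons, List.map_nil]
      congr 2
      rw [List.filter_append, List.filter_filter, List.filter_filter]
      have h3 : xs.filter (fun a => pvKey a == "Uncategorized" && !(pvKey a == "Uncategorized")) = [] := by
        apply List.filter_eq_nil_iff.mpr
        intro cd _
        simp
      rw [h3, List.nil_append]
      apply List.filter_congr
      intro cd _
      by_cases hck : pvKey cd = "Uncategorized" <;> simp [hck]
  · -- no Uncategorized page: A's move_to_end is skipped and B's partition is trivial
    have hcon : (pvFold xs).contains "Uncategorized" = false := by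
      rw [← Bool.not_eq_true, PySem.Dict.contains_iff_mem_keys, pvKeys_fold, PySem.Set.mem_ofList]
      exact hu
    rw [if_neg (by simp [hcon])]
    have hq : xs.filter (fun cd => pvKey cd == "Uncategorized") = [] := by
      apply List.filter_eq_nil_iff.mpr
      intro cd hcd
      simp only [beq_iff_eq]
      intro h
      exact hu (h ▸ List.mem_map_of_mem hcd)
    have hp : xs.filter (fun cd => !(pvKey cd == "Uncategorized")) = xs := by
      apply List.filter_eq_self.mpr
      intro cd hcd
      simp only [Bool.not_eq_eq_eq_not, Bool.not_true, beq_eq_false_iff_ne, ne_eq]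
      intro h
      exact hu (h ▸ List.mem_map_of_mem hcd)
    rw [hp, hq, List.append_nil]

-- ===== VERDICT (by name: the statement is the Claim_ definition above) =====
theorem get_storylines_spec : Claim_equal_get_storylines := by
  intro xs _ _
  unfold Spec_get_storylines
  exact pvMain xs
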